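-- pv_equiv track=rewrite | github.com/bbeni/advent_of_code_2023 | py_days/prob_12_2.py | generate_from_counts
-- ===== SOURCE A (Python) =====
-- def perm_sums_up(n, length):
--     if length == 0:
--         return []
--     if length == 1:
--         yield [n]
--
--     for i in range(0,n+1):
--         for p in perm_sums_up(n-i, length-1):
--             yield [i] + p
--
-- def generate_from_counts(counts, l):
--     n_broken = sum(counts)
--     n_c = len(counts)-1
--     # n_broken + n_c + n_sep = l
--     # additional separators to place between
--     n_sep = l - n_broken - n_c
--
--     # arr [0, 0, 2, 2] len n_c
--
--     results = []
--     for arr in perm_sums_up(n_sep, n_c+2):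
--         results.append(make_seq(counts, arr))
--
--
--     return results
--
-- def make_seq(counts, sep_arr):
--     ### counts [1 2 3 1]
--     ### sep_arr [0 0 1 2 2]
--     ### -> '#.##..###...#..'
--     res = sep_arr[0]*'.'
--     for a, b in zip(counts[:-1], sep_arr[1:-1]):
--         res += a*'#' + '.' + b*'.'
--     return res + counts[-1]*'#' + sep_arr[-1]*'.'
-- ===== SOURCE B (Python) =====
-- # B: instead of recursively enumerating separator placements, start from the
-- # lexicographically first composition and step through all of them with a
-- # lexicographic-successor function, using the closed-form binomial count
-- # C(n_sep+k-1, k-1) for the number of iterations.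
--
-- def make_seq(counts, sep_arr):
--     res = sep_arr[0]*'.'
--     for a, b in zip(counts[:-1], sep_arr[1:-1]):
--         res += a*'#' + '.' + b*'.'
--     return res + counts[-1]*'#' + sep_arr[-1]*'.'
--
-- def _next_comp(c):
--     # lexicographic successor of a composition (must not be the last, [x,0,...,0])
--     head, tail = c[0], c[1:]
--     if any(x > 0 for x in tail[1:]):
--         return [head] + _next_comp(tail)
--     return [head + 1] + [0]*(len(tail) - 1) + [sum(tail) - 1]
--
-- def generate_from_counts(counts, l):
--     n_sep = l - sum(counts) - (len(counts) - 1)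
--     k = len(counts) + 1
--     if n_sep < 0:
--         return []
--     total = 1
--     for i in range(1, k):
--         total = total * (n_sep + i) // i   # C(n_sep + k - 1, k - 1)
--     comp = [0]*(k - 1) + [n_sep]
--     results = []
--     for _ in range(total - 1):
--         results.append(make_seq(counts, comp))
--         comp = _next_comp(comp)
--     results.append(make_seq(counts, comp))
--     return results
-- ===== Notes on version B (the rewrite author's own statement) =====
-- stated objective: alternative
-- what changed: Replaced the recursive generator that enumerates every separator composition by re-branching at each position with an iterative walk: B computes the closed-form count C(n_sep+k-1,k-1) of compositions and repeatedly applies a lexicographic-successor function starting from the first composition [0,...,0,n_sep].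
import Mathlib
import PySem

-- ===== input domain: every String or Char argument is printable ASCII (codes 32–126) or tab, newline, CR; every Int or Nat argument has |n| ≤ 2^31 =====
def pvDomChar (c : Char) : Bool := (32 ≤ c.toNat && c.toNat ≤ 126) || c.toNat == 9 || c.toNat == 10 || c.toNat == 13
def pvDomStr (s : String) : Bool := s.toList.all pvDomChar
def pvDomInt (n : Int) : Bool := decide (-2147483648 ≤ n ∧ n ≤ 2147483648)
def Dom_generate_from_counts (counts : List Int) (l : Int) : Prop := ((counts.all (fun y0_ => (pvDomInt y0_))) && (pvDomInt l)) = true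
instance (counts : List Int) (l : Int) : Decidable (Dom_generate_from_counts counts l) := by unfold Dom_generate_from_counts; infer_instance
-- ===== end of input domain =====

-- B replaces A's recursive enumeration of separator compositions by an iterative
-- lexicographic-successor walk driven by the closed-form binomial count (objective: alternative).

-- ===== PORT A =====

-- n*'.' for a Python int n: negative n gives '' (Int.toNat clamps exactly like Python's negative repeat)
def pvRep (c : Char) (n : Int) : List Char := List.replicate n.toNat c

-- make_seq (identical source in Source A and Source B, so shared by both ports);
-- sep_arr[0], counts[-1], sep_arr[-1] via pyGetD: in-range on every reachable call (Pre_ excludes counts = [])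
def pvMakeSeq (counts : List Int) (sep_arr : List Int) : String :=
  let res := pvRep '.' (PySem.List.pyGetD sep_arr 0 0)
  let res := ((PySem.List.slice counts none (some (-1))).zip
              (PySem.List.slice sep_arr (some 1) (some (-1)))).foldl
      (fun r ab => r ++ pvRep '#' ab.1 ++ ['.'] ++ pvRep '.' ab.2) res
  String.ofList (res ++ pvRep '#' (PySem.List.pyGetD counts (-1) 0) ++ pvRep '.' (PySem.List.pyGetD sep_arr (-1) 0))

-- perm_sums_up: Python's generator collected into a list; the length argument is a Nat
-- (every call passes n_c+2 = len(counts)+1 ≥ 1, and the recursion decreases it by 1)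
def pvPermSumsUp (n : Int) : Nat → List (List Int)
  | 0 => []
  | Nat.succ m =>
    (if m = 0 then [[n]] else []) ++
    (PySem.List.pyRange 0 (n + 1) 1).flatMap
      (fun i => (pvPermSumsUp (n - i) m).map (fun p => i :: p))

def generate_from_counts (counts : List Int) (l : Int) : List String :=
  let n_broken := counts.sum
  let n_c : Int := (counts.length : Int) - 1
  let n_sep := l - n_broken - n_c
  (pvPermSumsUp n_sep (counts.length + 1)).map (fun arr => pvMakeSeq counts arr)

-- ===== PORT B =====

-- _next_comp: lexicographic successor of a composition ([] unreachable: Python would raise there)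
def pvNextComp : List Int → List Int
  | [] => []
  | head :: tail =>
    if (tail.drop 1).any (fun x => decide (0 < x)) then head :: pvNextComp tail
    else (head + 1) :: (List.replicate (tail.length - 1) 0 ++ [tail.sum - 1])

-- the main loop: 'for _ in range(total-1): append(make_seq); comp = _next_comp(comp)' then one final append
def pvGenLoop (counts : List Int) (comp : List Int) : Nat → List String
  | 0 => [pvMakeSeq counts comp]
  | Nat.succ m => pvMakeSeq counts comp :: pvGenLoop counts (pvNextComp comp) m

def generate_from_counts_alt (counts : List Int) (l : Int) : List String :=
  let n_sep := l - counts.sum - ((counts.length : Int) - 1)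
  let k : Int := (counts.length : Int) + 1
  if n_sep < 0 then []
  else
    let total := (PySem.List.pyRange 1 k 1).foldl
        (fun t i => PySem.Int.floordiv (t * (n_sep + i)) i) 1
    pvGenLoop counts (List.replicate counts.length 0 ++ [n_sep]) (total - 1).toNat

-- ===== PRECONDITION & SPEC =====
-- Pre_ excludes counts = [], on which A always raises IndexError (make_seq indexes counts[-1]).
def Pre_generate_from_counts (counts : List Int) (l : Int) : Prop := counts ≠ []
instance (counts : List Int) (l : Int) : Decidable (Pre_generate_from_counts counts l) := by
  unfold Pre_generate_from_counts; infer_instance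

def pvWitness_generate_from_counts : List Int × Int := ([1, 2], 7)

def Spec_generate_from_counts (counts : List Int) (l : Int) (out : List String) : Prop :=
  out = generate_from_counts_alt counts l
instance (counts : List Int) (l : Int) (out : List String) : Decidable (Spec_generate_from_counts counts l out) := by
  unfold Spec_generate_from_counts; infer_instance

-- ===== CLAIM (what is proved, stated in full; the proofs are below) =====
def Claim_equal_generate_from_counts : Prop := ∀ (counts : List Int) (l : Int),
  Dom_generate_from_counts counts l → Pre_generate_from_counts counts l →
  Spec_generate_from_counts counts l (generate_from_counts counts l)

-- ===== LEMMAS AND PROOFS =====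

-- the relation along which B's loop walks: the current composition still has a successor
-- (something positive after position 0) and pvNextComp takes it to the next one
def pvStep (a b : List Int) : Prop :=
  (a.drop 1).any (fun x => decide (0 < x)) = true ∧ pvNextComp a = b

theorem pvPermSumsUp_one (n : Int) : pvPermSumsUp n 1 = [[n]] := by
  simp [pvPermSumsUp]

theorem pvPermSumsUp_ge_two (n : Int) (m : Nat) (hm : m ≠ 0) :
    pvPermSumsUp n (m+1) =
      (PySem.List.pyRange 0 (n + 1) 1).flatMap
        (fun i => (pvPermSumsUp (n - i) m).map (fun p => i :: p)) := by
  simp [pvPermSumsUp, hm]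

theorem pvHead (k : Nat) (hk : 1 ≤ k) : ∀ (m : Int), 0 ≤ m →
    (pvPermSumsUp m k).head? = some (List.replicate (k-1) 0 ++ [m]) := by
  induction k with
  | zero => omega
  | succ kk ih =>
    intro m hm
    by_cases h0 : kk = 0
    · subst h0; simp [pvPermSumsUp_one]
    · rw [pvPermSumsUp_ge_two m kk h0]
      rw [PySem.List.pyRange_one_cons (by omega)]
      rw [List.flatMap_cons, List.head?_append, List.head?_map,
          ih (by omega) (m - 0) (by omega)]
      cases kk with
      | zero => omega
      | succ j => simp [List.replicate_succ]

theorem pvLast (k : Nat) (hk : 1 ≤ k) : ∀ (m : Int), 0 ≤ m →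
    (pvPermSumsUp m k).getLast? = some (m :: List.replicate (k-1) 0) := by
  induction k with
  | zero => omega
  | succ kk ih =>
    intro m hm
    by_cases h0 : kk = 0
    · subst h0; simp [pvPermSumsUp_one]
    · rw [pvPermSumsUp_ge_two m kk h0]
      have : PySem.List.pyRange 0 (m+1) 1 = PySem.List.pyRange 0 m 1 ++ [m] := by
        have := PySem.List.pyRange_one_succ_right (a := 0) (b := m) (by omega)
        simpa using this
      rw [this, List.flatMap_append, List.getLast?_append, List.flatMap_cons,
          List.flatMap_nil, List.append_nil, List.getLast?_map,
          ih (by omega) (m - m) (by omega)]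
      simp
      cases kk with
      | zero => omega
      | succ j => simp [List.replicate_succ]

theorem pv_any_of_drop {p : List Int} (h : (p.drop 1).any (fun x => decide (0 < x)) = true) :
    p.any (fun x => decide (0 < x)) = true := by
  rcases p with _ | ⟨a, t⟩ <;> simp_all

theorem pvStep_cons {i : Int} {p q : List Int} (h : pvStep p q) : pvStep (i :: p) (i :: q) := by
  obtain ⟨h1, h2⟩ := h
  refine ⟨?_, ?_⟩
  · show ((i :: p).drop 1).any (fun x => decide (0 < x)) = true
    simp only [List.drop_succ_cons, List.drop_zero]
    exact pv_any_of_drop h1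
  show pvNextComp (i :: p) = i :: q
  have h1' : ∃ x ∈ p.tail, 0 < x := by simpa using h1
  rw [pvNextComp.eq_def]
  simp [h1', h2]

theorem pvChainBlock (i : Int) (ls : List (List Int)) (h : List.IsChain pvStep ls) :
    List.IsChain pvStep (ls.map (fun p => i :: p)) := by
  rw [List.isChain_map]
  exact h.imp (fun a b => pvStep_cons)

theorem pvNextComp_boundary (a x : Int) (r : Nat) :
    pvNextComp (a :: x :: List.replicate r 0) = (a + 1) :: (List.replicate r 0 ++ [x - 1]) := by
  rw [pvNextComp.eq_def]
  simp

theorem pvChainAux (kk : Nat) (hkk : 1 ≤ kk)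
    (ihk : ∀ (m' : Int), 0 ≤ m' → List.IsChain pvStep (pvPermSumsUp m' kk)) :
    ∀ (d : Nat) (a m : Int), 0 ≤ a → a + d = m →
    List.IsChain pvStep ((PySem.List.pyRange a (m + 1) 1).flatMap
      (fun i => (pvPermSumsUp (m - i) kk).map (fun p => i :: p))) := by
  intro d
  induction d with
  | zero =>
    intro a m ha he
    have ham : a = m := by omega
    subst ham
    rw [PySem.List.pyRange_one_singleton, List.flatMap_cons, List.flatMap_nil, List.append_nil]
    exact pvChainBlock a _ (ihk (a - a) (by omega))
  | succ dd ih =>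
    intro a m ha he
    rw [PySem.List.pyRange_one_cons (by omega : a < m + 1), List.flatMap_cons]
    apply List.IsChain.append
    · exact pvChainBlock a _ (ihk (m - a) (by omega))
    · exact ih (a + 1) m (by omega) (by omega)
    · intro x hx y hy
      rw [List.getLast?_map, pvLast kk hkk (m - a) (by omega)] at hx
      rw [PySem.List.pyRange_one_cons (by omega : a + 1 < m + 1), List.flatMap_cons,
          List.head?_append, List.head?_map, pvHead kk hkk (m - (a + 1)) (by omega)] at hy
      simp only [Option.map_some, Option.mem_def, Option.some.injEq, Option.some_or] at hx hy
      subst hx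
      subst hy
      refine ⟨?_, ?_⟩
      · show (((a :: (m - a) :: List.replicate (kk - 1) 0).drop 1).any fun x => decide (0 < x)) = true
        simp
        omega
      · have e : m - a - 1 = m - (a + 1) := by ring
        rw [pvNextComp_boundary, e]

theorem pvChain (k : Nat) (hk : 1 ≤ k) : ∀ (m : Int), 0 ≤ m →
    List.IsChain pvStep (pvPermSumsUp m k) := by
  induction k with
  | zero => omega
  | succ kk ih =>
    intro m hm
    by_cases h0 : kk = 0
    · subst h0; rw [pvPermSumsUp_one]; exact List.isChain_singleton _
    · rw [pvPermSumsUp_ge_two m kk h0]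
      have := pvChainAux kk (by omega) (fun m' hm' => ih (by omega) m' hm')
        m.toNat 0 m (by omega) (by omega)
      simpa using this

theorem pvHS (r : Nat) : ∀ (M : Nat),
    ((List.range (M + 1)).map (fun i => Nat.choose (M - i + r) r)).sum
      = Nat.choose (M + r + 1) (r + 1) := by
  intro M
  induction M with
  | zero => simp
  | succ MM ih =>
    rw [List.range_succ_eq_map, List.map_cons, List.map_map, List.sum_cons]
    have h1 : (List.range (MM + 1)).map ((fun i => Nat.choose (MM + 1 - i + r) r) ∘ Nat.succ)
        = (List.range (MM + 1)).map (fun i => Nat.choose (MM - i + r) r) := by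
      apply List.map_congr_left
      intro i hi
      simp only [Function.comp_apply]
      congr 1
      omega
    rw [h1, ih]
    have h2 := Nat.choose_succ_succ' (MM + r + 1) r
    have h3 : MM + 1 - 0 + r = MM + r + 1 := by omega
    rw [h3]
    have h4 : MM + 1 + r + 1 = MM + r + 1 + 1 := by omega
    rw [h4, h2]

theorem pvLength (k : Nat) (hk : 1 ≤ k) : ∀ (m : Int), 0 ≤ m →
    (pvPermSumsUp m k).length = Nat.choose (m.toNat + (k - 1)) (k - 1) := by
  induction k with
  | zero => omega
  | succ kk ih =>
    intro m hm
    by_cases h0 : kk = 0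
    · subst h0; simp [pvPermSumsUp_one]
    · rw [pvPermSumsUp_ge_two m kk h0, List.length_flatMap]
      rw [PySem.List.pyRange_one, List.map_map]
      have hM : (m + 1 - 0).toNat = m.toNat + 1 := by omega
      rw [hM]
      have h1 : (List.range (m.toNat + 1)).map
            ((fun a => ((pvPermSumsUp (m - a) kk).map (fun p => a :: p)).length) ∘ (fun j : Nat => (0 : Int) + ↑j))
          = (List.range (m.toNat + 1)).map (fun j => Nat.choose (m.toNat - j + (kk - 1)) (kk - 1)) := by
        apply List.map_congr_left
        intro j hj
        have hj' : j < m.toNat + 1 := List.mem_range.mp hj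
        simp only [Function.comp_apply, List.length_map]
        rw [show (0 : Int) + j = (j : Int) by ring]
        rw [ih (by omega) (m - j) (by omega)]
        have hj : (m - (j : Int)).toNat = m.toNat - j := by omega
        rw [hj]
      rw [h1, pvHS]
      have hkk : kk - 1 + 1 = kk + 1 - 1 := by omega
      have hmm : m.toNat + (kk - 1) + 1 = m.toNat + (kk + 1 - 1) := by omega
      rw [hkk, hmm]

theorem pvFold (n : Int) (hn : 0 ≤ n) : ∀ (K : Nat),
    (PySem.List.pyRange 1 ((K : Int) + 1) 1).foldl
        (fun t i => PySem.Int.floordiv (t * (n + i)) i) 1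
      = (Nat.choose (n.toNat + K) K : Int) := by
  intro K
  induction K with
  | zero => simp [PySem.List.pyRange_one_eq_nil]
  | succ KK ih =>
    have hcast : ((KK + 1 : Nat) : Int) + 1 = ((KK : Int) + 1) + 1 := by push_cast; ring
    rw [hcast, PySem.List.pyRange_one_succ_right (by omega), List.foldl_append, ih]
    simp only [List.foldl_cons, List.foldl_nil]
    have e0 : n + ((KK : Int) + 1) = ((n.toNat + KK + 1 : Nat) : Int) := by omega
    have hs := Nat.add_one_mul_choose_eq (n.toNat + KK) KK
    have e1 : (Nat.choose (n.toNat + KK) KK : Int) * (n + ((KK : Int) + 1))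
        = ((Nat.choose (n.toNat + KK + 1) (KK + 1) : Nat) : Int) * ((KK : Int) + 1) := by
      rw [e0]
      push_cast
      push_cast at hs
      nlinarith [hs]
    rw [e1, PySem.Int.floordiv_eq_ediv_of_pos (by omega : (0:Int) < (KK : Int) + 1),
        Int.mul_ediv_cancel _ (by omega : ((KK : Int) + 1) ≠ 0)]
    norm_cast

theorem pvIter (counts : List Int) : ∀ (ls : List (List Int)) (c : List Int),
    List.IsChain pvStep ls → ls.head? = some c →
    pvGenLoop counts c (ls.length - 1) = ls.map (pvMakeSeq counts) := by
  intro ls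
  induction ls with
  | nil => intro c _ h; simp at h
  | cons c0 rest ih =>
    intro c hch hh
    have hc : c = c0 := by simpa using hh.symm
    rw [hc]
    cases rest with
    | nil => simp [pvGenLoop]
    | cons c1 rest2 =>
      have hstep : pvStep c0 c1 := (List.isChain_cons_cons.mp hch).1
      have hch' : List.IsChain pvStep (c1 :: rest2) := (List.isChain_cons_cons.mp hch).2
      have hlen : (c0 :: c1 :: rest2).length - 1 = Nat.succ ((c1 :: rest2).length - 1) := by
        simp
      rw [hlen, pvGenLoop, hstep.2, ih c1 hch' rfl]
      simp


theorem pv_main (counts : List Int) (l : Int) (hpre : counts ≠ []) :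
    generate_from_counts counts l = generate_from_counts_alt counts l := by
  have hlen : counts.length ≠ 0 := by
    cases counts
    · exact absurd rfl hpre
    · simp
  unfold generate_from_counts generate_from_counts_alt
  simp only []
  set n := l - counts.sum - ((counts.length : Int) - 1) with hn
  by_cases hneg : n < 0
  · rw [if_pos hneg]
    rw [pvPermSumsUp_ge_two n counts.length hlen]
    rw [PySem.List.pyRange_one_eq_nil (by omega : n + 1 ≤ 0)]
    simp
  · push Not at hneg
    rw [if_neg (by omega)]
    set K := counts.length with hK
    set C := Nat.choose (n.toNat + K) K with hC
    have hCpos : 1 ≤ C := Nat.choose_pos (by omega)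
    have hfold : (PySem.List.pyRange 1 ((K : Int) + 1) 1).foldl
        (fun t i => PySem.Int.floordiv (t * (n + i)) i) 1 = (C : Int) := pvFold n hneg K
    rw [hfold]
    have hlenL : (pvPermSumsUp n (K + 1)).length = C := by
      rw [pvLength (K + 1) (by omega) n hneg]
      simp [hC]
    have hhead : (pvPermSumsUp n (K + 1)).head? = some (List.replicate K 0 ++ [n]) := by
      rw [pvHead (K + 1) (by omega) n hneg]
      simp
    have hchain := pvChain (K + 1) (by omega) n hneg
    have := pvIter counts (pvPermSumsUp n (K + 1)) (List.replicate K 0 ++ [n]) hchain hhead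
    rw [hlenL] at this
    have htn : ((C : Int) - 1).toNat = C - 1 := by omega
    rw [htn, ← this]

-- ===== VERDICT (by name: the statement is the Claim_ definition above) =====
theorem generate_from_counts_spec : Claim_equal_generate_from_counts := by
  unfold Claim_equal_generate_from_counts
  intro counts l _ hpre
  unfold Spec_generate_from_counts
  exact pv_main counts l hpre
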